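-- pv_equiv track=rewrite | github.com/ocousinXLNX/U25N_apps | misc/u25_thermal_monitor.py | get_chips
-- ===== SOURCE A (Python) =====
-- def get_chips(sensors_output):
--     """Return a list of chips present in sensors_output.
--
--     Args:
--     sensors_output -- the text output from running 'sensors' (with no args)
--     """
--     chip_names = []
--     new_chip = True
--     for line in sensors_output.splitlines():
--         line = line.strip()
--         if not line:
--             new_chip = True
--             continue
--         if new_chip:
--             chip_names.append(line)
--             new_chip = False
--     return chip_names
-- ===== SOURCE B (Python) =====
-- def get_chips(sensors_output):
--     """Return a list of chips present in sensors_output.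
--
--     Args:
--     sensors_output -- the text output from running 'sensors' (with no args)
--     """
--     lines = [ln.strip() for ln in sensors_output.splitlines()]
--     return [cur for prev, cur in zip([""] + lines, lines) if cur and not prev]
-- ===== Notes on version B (the rewrite author's own statement) =====
-- stated objective: idiomatic
-- what changed: Replaces the per-line new_chip boolean state machine with a stateless comprehension: strip all lines once, zip each line with its predecessor, and keep lines that are non-empty and follow an empty line.
import Mathlib
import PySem

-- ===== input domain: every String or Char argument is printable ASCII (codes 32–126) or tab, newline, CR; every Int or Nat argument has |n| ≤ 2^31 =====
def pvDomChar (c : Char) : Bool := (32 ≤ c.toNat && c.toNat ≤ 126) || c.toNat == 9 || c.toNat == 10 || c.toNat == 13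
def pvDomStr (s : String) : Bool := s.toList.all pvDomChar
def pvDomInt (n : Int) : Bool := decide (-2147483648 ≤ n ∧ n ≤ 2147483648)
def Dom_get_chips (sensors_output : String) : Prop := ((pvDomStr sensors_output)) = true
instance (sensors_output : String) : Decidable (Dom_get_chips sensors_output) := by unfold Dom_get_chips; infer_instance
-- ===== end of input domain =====

-- B replaces A's new_chip state machine by a stateless zip-with-predecessor comprehension (idiomatic decomposition).

-- ===== PORT A =====
-- literal port of A: fold over the lines with state (chip_names, new_chip)
def get_chips (sensors_output : String) : List String :=
  ((PySem.Str.splitlines sensors_output).foldl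
    (fun (st : List String × Bool) line =>
      let line := PySem.Str.strip line
      if line = "" then (st.1, true)
      else if st.2 then (st.1 ++ [line], false) else st)
    ([], true)).1

-- ===== PORT B =====
-- literal port of B: strip every line, zip with predecessors ("" prepended), filter, take the line
def get_chips_alt (sensors_output : String) : List String :=
  let lines := (PySem.Str.splitlines sensors_output).map PySem.Str.strip
  ((("" :: lines).zip lines).filter (fun p => p.2 ≠ "" && p.1 == "")).map Prod.snd

-- ===== PRECONDITION & SPEC =====
def Spec_get_chips (sensors_output : String) (out : List String) : Prop := out = get_chips_alt sensors_output
instance (sensors_output : String) (out : List String) : Decidable (Spec_get_chips sensors_output out) := by unfold Spec_get_chips; infer_instance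

-- ===== CLAIM (what is proved, stated in full; the proofs are below) =====
def Claim_equal_get_chips : Prop := ∀ (sensors_output : String), Dom_get_chips sensors_output → Spec_get_chips sensors_output (get_chips sensors_output)

-- ===== LEMMAS AND PROOFS =====

-- common reference function: first non-blank stripped line of each blank-separated block
def pvBlocks (b : Bool) : List String → List String
  | [] => []
  | x :: xs =>
    let t := PySem.Str.strip x
    if t = "" then pvBlocks true xs
    else (if b then [t] else []) ++ pvBlocks false xs

lemma pvLoop_eq (l : List String) (acc : List String) (b : Bool) :
    (l.foldl
      (fun (st : List String × Bool) line =>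
        let line := PySem.Str.strip line
        if line = "" then (st.1, true)
        else if st.2 then (st.1 ++ [line], false) else st)
      (acc, b)).1 = acc ++ pvBlocks b l := by
  induction l generalizing acc b with
  | nil => simp [pvBlocks]
  | cons x xs ih =>
    simp only [List.foldl_cons, pvBlocks]
    by_cases h : PySem.Str.strip x = "" <;> cases b <;>
      simp [h, ih]

lemma pvZip_eq (l : List String) (p : String) :
    (((p :: l.map PySem.Str.strip).zip (l.map PySem.Str.strip)).filter
        (fun q => q.2 ≠ "" && q.1 == "")).map Prod.snd
      = pvBlocks (p == "") l := by
  induction l generalizing p with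
  | nil => simp [pvBlocks]
  | cons x xs ih =>
    simp only [List.map_cons, List.zip_cons_cons, List.filter_cons, pvBlocks]
    by_cases h : PySem.Str.strip x = ""
    · have h2 := ih ""
      simp only [beq_self_eq_true] at h2
      simp only [decide_not] at h2 ⊢
      by_cases hp : p = "" <;> simp [h, hp, h2]
    · have h2 := ih (PySem.Str.strip x)
      simp only [decide_not] at h2 ⊢
      have hb : (PySem.Str.strip x == "") = false := beq_eq_false_iff_ne.mpr h
      rw [hb] at h2
      by_cases hp : p = "" <;> simp [h, hp, h2]

-- ===== VERDICT (by name: the statement is the Claim_ definition above) =====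
theorem get_chips_spec : Claim_equal_get_chips := by
  intro s _
  show get_chips s = get_chips_alt s
  unfold get_chips get_chips_alt
  rw [pvLoop_eq, pvZip_eq]
  simp
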